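-- pv_equiv track=rewrite | github.com/YegorR/Chomsky_hierarchy_classifier | gram.py | is_type_1_kz
-- ===== SOURCE A (Python) =====
-- def is_empty_word(word):
--     """Проверяет, является ли цепочка пустой"""
--     for symbol in word:
--         if symbol != "_":
--             return False
--     return True
--
-- def is_type_1_kz(vt, vn, s, p):
--     """Тип 1, контекстно-зависимая грамматика"""
--     for rule in p:
--         is_right = False
--         for i in range(len(rule[0])):
--             if rule[0][i] in vn:
--                 a = rule[0][:i]
--                 b = rule[0][i+1:]
--                 if rule[1][:i] == a and rule[1][len(rule[1])-len(b):] == b \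
--                         and not is_empty_word(rule[1][i:len(rule[1])-len(b)]):
--                     is_right = True
--                     break
--         if not is_right:
--             return False
--     return True
-- ===== SOURCE B (Python) =====
-- def _common_prefix_len(x, y):
--     """Length of the longest common prefix of x and y."""
--     k = 0
--     while k < len(x) and k < len(y) and x[k] == y[k]:
--         k += 1
--     return k
--
-- def is_type_1_kz(vt, vn, s, p):
--     """Тип 1, контекстно-зависимая грамматика via precomputed prefix/suffix lengths and prefix sums"""
--     vn_set = set(vn)
--     for rule in p:
--         lhs, rhs = rule[0], rule[1]
--         L, R = len(lhs), len(rhs)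
--         cp = _common_prefix_len(lhs, rhs)
--         cs = _common_prefix_len(lhs[::-1], rhs[::-1])
--         # nu[j] = number of non-underscore characters in rhs[:j]
--         nu = [0]
--         t = 0
--         for ch in rhs:
--             if ch != "_":
--                 t += 1
--             nu.append(t)
--         ok = False
--         for i in range(L):
--             lenb = L - 1 - i
--             e = R - lenb
--             if lhs[i] in vn_set and i <= cp and lenb <= cs and e > i and nu[e] > nu[i]:
--                 ok = True
--                 break
--         if not ok:
--             return False
--     return True
-- ===== Notes on version B (the rewrite author's own statement) =====
-- stated objective: alternative
-- what changed: Per rule, B precomputes the common prefix/suffix lengths of lhs and rhs and a prefix-sum table of non-underscore characters of rhs, then tests each candidate position with O(1) arithmetic comparisons instead of A's per-position slice comparisons and middle scan.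
import Mathlib
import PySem

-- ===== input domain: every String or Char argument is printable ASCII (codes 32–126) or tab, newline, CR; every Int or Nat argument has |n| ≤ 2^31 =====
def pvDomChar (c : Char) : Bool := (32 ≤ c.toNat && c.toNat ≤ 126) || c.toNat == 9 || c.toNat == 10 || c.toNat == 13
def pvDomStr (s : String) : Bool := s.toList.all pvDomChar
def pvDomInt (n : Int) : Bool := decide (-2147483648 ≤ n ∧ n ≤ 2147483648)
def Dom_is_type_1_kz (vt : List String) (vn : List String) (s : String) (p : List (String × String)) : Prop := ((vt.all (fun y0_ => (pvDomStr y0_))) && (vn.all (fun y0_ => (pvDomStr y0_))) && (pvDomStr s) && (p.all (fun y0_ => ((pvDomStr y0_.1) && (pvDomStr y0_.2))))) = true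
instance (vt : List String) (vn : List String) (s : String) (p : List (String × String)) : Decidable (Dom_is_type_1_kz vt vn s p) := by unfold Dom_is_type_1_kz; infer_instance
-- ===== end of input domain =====

-- B replaces A's per-position slice comparisons and middle-scan by precomputed
-- common prefix/suffix lengths plus a prefix-sum table of non-underscore characters
-- of rhs, testing each candidate position by arithmetic comparisons instead.

-- ===== PORT A =====
-- is_empty_word: loop with early return on a non-underscore symbol
def pyA_isEmptyWord (word : List Char) : Bool :=
  word.all (fun symbol => symbol == '_')

-- inner 'for i in range(len(rule[0]))' loop with break ⇒ List.any over the range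
def pyA_ruleOk (vn : List String) (l0 l1 : List Char) : Bool :=
  (List.range l0.length).any (fun i =>
    vn.contains (String.ofList [l0[i]!]) &&
      ((PySem.List.slice l1 none (some (i : Int))
          == PySem.List.slice l0 none (some (i : Int))) &&
       (PySem.List.slice l1
          (some ((l1.length : Int) - ((PySem.List.slice l0 (some ((i : Int) + 1)) none).length : Int))) none
          == PySem.List.slice l0 (some ((i : Int) + 1)) none) &&
       !pyA_isEmptyWord (PySem.List.slice l1 (some (i : Int))
          (some ((l1.length : Int) - ((PySem.List.slice l0 (some ((i : Int) + 1)) none).length : Int))))))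

def is_type_1_kz (vt : List String) (vn : List String) (s : String) (p : List (String × String)) : Bool :=
  p.all (fun rule => pyA_ruleOk vn rule.1.toList rule.2.toList)

-- ===== PORT B =====
-- _common_prefix_len
def altCP : List Char → List Char → Nat
  | c :: cs, d :: ds => if c == d then altCP cs ds + 1 else 0
  | _, _ => 0

-- nu[j] = number of non-underscore characters in rhs[:j], built by one pass
def altNu (l : List Char) : List Nat :=
  (l.foldl (fun (st : List Nat × Nat) ch =>
      let t := if ch == '_' then st.2 else st.2 + 1
      (st.1 ++ [t], t)) ([0], 0)).1

def altRuleOk (vns : PySem.Set String) (l0 l1 : List Char) : Bool :=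
  let L := l0.length
  let R := l1.length
  let cp := altCP l0 l1
  let cs := altCP l0.reverse l1.reverse
  let nu := altNu l1
  (List.range L).any (fun i =>
    let lenb := L - 1 - i
    let e : Int := (R : Int) - (lenb : Int)
    PySem.Set.contains vns (String.ofList [l0[i]!]) &&
      decide (i ≤ cp) && decide (lenb ≤ cs) &&
      decide ((i : Int) < e) && decide (nu[i]! < nu[e.toNat]!))

def is_type_1_kz_alt (vt : List String) (vn : List String) (s : String) (p : List (String × String)) : Bool :=
  let vns := PySem.Set.ofList vn
  p.all (fun rule => altRuleOk vns rule.1.toList rule.2.toList)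

-- ===== PRECONDITION & SPEC =====
def Spec_is_type_1_kz (vt : List String) (vn : List String) (s : String) (p : List (String × String)) (out : Bool) : Prop := out = is_type_1_kz_alt vt vn s p
instance (vt : List String) (vn : List String) (s : String) (p : List (String × String)) (out : Bool) : Decidable (Spec_is_type_1_kz vt vn s p out) := by unfold Spec_is_type_1_kz; infer_instance

-- ===== CLAIM (what is proved, stated in full; the proofs are below) =====
def Claim_equal_is_type_1_kz : Prop := ∀ (vt : List String) (vn : List String) (s : String) (p : List (String × String)), Dom_is_type_1_kz vt vn s p → Spec_is_type_1_kz vt vn s p (is_type_1_kz vt vn s p)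

-- ===== LEMMAS AND PROOFS =====

theorem altCP_le_right : ∀ (x y : List Char), altCP x y ≤ y.length := by
  intro x y
  induction x generalizing y with
  | nil => simp [altCP]
  | cons c cs ih =>
    cases y with
    | nil => simp [altCP]
    | cons d ds =>
      simp only [altCP]
      split
      · simpa using Nat.succ_le_succ (ih ds)
      · simp

theorem cp_le_iff : ∀ (i : Nat) (x y : List Char), i ≤ x.length →
    (List.take i y = List.take i x ↔ i ≤ altCP x y) := by
  intro i
  induction i with
  | zero => simp
  | succ k ih =>
    intro x y hx
    cases x with
    | nil => simp at hx
    | cons c cs =>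
      cases y with
      | nil =>
        simp only [List.take_nil, altCP]
        constructor
        · intro h; exact absurd h.symm (by simp)
        · intro h; omega
      | cons d ds =>
        simp only [List.take_succ_cons, altCP]
        by_cases hcd : c = d
        · subst hcd
          simp only [beq_self_eq_true, if_true]
          rw [List.cons_inj_right, ih cs ds (by simpa using hx)]
          omega
        · rw [if_neg (by simpa using hcd)]
          constructor
          · intro h
            exact absurd (List.head_eq_of_cons_eq h) (fun hh => hcd hh.symm)
          · intro h; omega

theorem getBang_eq {α : Type} [Inhabited α] (l : List α) (i : Nat) (h : i < l.length) :
    l[i]! = l[i] := by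
  rw [List.getElem!_eq_getElem?_getD, List.getElem?_eq_getElem h]; rfl

theorem altNu_fold : ∀ (l : List Char) (acc : List Nat) (t : Nat),
    (l.foldl (fun (st : List Nat × Nat) ch =>
      let t' := if ch == '_' then st.2 else st.2 + 1
      (st.1 ++ [t'], t')) (acc, t)).1
    = acc ++ (List.range l.length).map
        (fun j => t + (l.take (j+1)).countP (fun c => !(c == '_'))) := by
  intro l
  induction l with
  | nil => intro acc t; simp
  | cons ch l' ih =>
    intro acc t
    simp only [List.foldl_cons]
    rw [ih]
    rw [List.length_cons, List.range_succ_eq_map, List.map_cons, List.map_map]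
    simp only [List.take_succ_cons, List.countP_cons, List.append_assoc, List.singleton_append,
      Function.comp]
    congr 1
    congr 1
    · simp [List.countP_cons, List.countP_nil]
      by_cases h : ch = '_' <;> simp [h]
    · apply List.map_congr_left
      intro j _
      simp [List.countP_cons]
      by_cases h : ch = '_' <;> simp [h] <;> omega

theorem altNu_get (l : List Char) (j : Nat) (h : j ≤ l.length) :
    (altNu l)[j]! = (l.take j).countP (fun c => !(c == '_')) := by
  have he : altNu l = 0 :: (List.range l.length).map
      (fun j => (l.take (j+1)).countP (fun c => !(c == '_'))) := by
    unfold altNu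
    rw [altNu_fold]
    simp
  rw [he]
  cases j with
  | zero => simp
  | succ k =>
    rw [getBang_eq _ _ (by simp; omega)]
    simp

theorem ruleOk_eq (vn : List String) (l0 l1 : List Char) :
    pyA_ruleOk vn l0 l1 = altRuleOk (PySem.Set.ofList vn) l0 l1 := by
  unfold pyA_ruleOk altRuleOk
  simp only
  rw [Bool.eq_iff_iff]
  simp only [List.any_eq_true, List.mem_range]
  apply exists_congr
  intro i
  apply and_congr_right
  intro hiL
  set L := l0.length with hL
  set R := l1.length with hR
  -- membership test: list vs set
  have hmem : vn.contains (String.ofList [l0[i]!])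
      = PySem.Set.contains (PySem.Set.ofList vn) (String.ofList [l0[i]!]) := by
    rw [Bool.eq_iff_iff]
    simp [PySem.Set.contains, PySem.Set.mem_ofList]
  -- b = rule[0][i+1:]
  have hb : PySem.List.slice l0 (some ((i : Int) + 1)) none = l0.drop (i+1) := by
    have h : ((i : Int) + 1) = ((i + 1 : Nat) : Int) := by push_cast; ring
    rw [h, PySem.List.slice_from_natCast]
  have hblen : ((PySem.List.slice l0 (some ((i : Int) + 1)) none).length : Int)
      = ((L - 1 - i : Nat) : Int) := by
    rw [hb, List.length_drop]
    have : L - (i + 1) = L - 1 - i := by omega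
    rw [this]
  -- prefix condition
  have h1 : (PySem.List.slice l1 none (some (i : Int))
        == PySem.List.slice l0 none (some (i : Int)))
      = decide (i ≤ altCP l0 l1) := by
    rw [PySem.List.slice_to_natCast, PySem.List.slice_to_natCast, Bool.eq_iff_iff]
    simp only [beq_iff_eq, decide_eq_true_eq]
    exact cp_le_iff i l0 l1 (Nat.le_of_lt hiL)
  rw [hmem, h1, hblen]
  set lenb := L - 1 - i with hlenb
  by_cases hRb : lenb ≤ R
  · -- suffix condition
    have h2 : (PySem.List.slice l1 (some ((R : Int) - ((lenb : Nat) : Int))) none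
          == PySem.List.slice l0 (some ((i : Int) + 1)) none)
        = decide (lenb ≤ altCP l0.reverse l1.reverse) := by
      rw [hb, PySem.List.slice_from l1 (by omega), Bool.eq_iff_iff]
      simp only [beq_iff_eq, decide_eq_true_eq]
      have htn : ((R : Int) - (lenb : Int)).toNat = R - lenb := by omega
      rw [htn, ← List.reverse_inj, List.reverse_drop, List.reverse_drop]
      have e1 : R - (R - lenb) = lenb := by omega
      have e2 : L - (i + 1) = lenb := by omega
      rw [hR] at e1
      rw [hL] at e2
      rw [e1, e2]
      exact cp_le_iff lenb l0.reverse l1.reverse (by rw [List.length_reverse, ← hL]; omega)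
    rw [h2]
    by_cases hcs : lenb ≤ altCP l0.reverse l1.reverse
    · -- middle condition
      set eN := R - lenb with heN
      have hcast : ((R : Int) - ((lenb : Nat) : Int)) = ((eN : Nat) : Int) := by omega
      have h3 : (!pyA_isEmptyWord (PySem.List.slice l1 (some (i : Int))
            (some ((R : Int) - ((lenb : Nat) : Int)))))
          = (decide ((i : Int) < (R : Int) - ((lenb : Nat) : Int))
             && decide ((altNu l1)[i]! < (altNu l1)[((R : Int) - ((lenb : Nat) : Int)).toNat]!)) := by
        rw [hcast, PySem.List.slice_natCast, Bool.eq_iff_iff]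
        by_cases hie : i < eN
        · have hni := altNu_get l1 i (by omega)
          have hne := altNu_get l1 eN (by omega)
          have htake : l1.take eN = l1.take i ++ (l1.drop i).take (eN - i) := by
            rw [← List.take_add]
            congr 1
            omega
          have hcnt : (l1.take eN).countP (fun c => !(c == '_'))
              = (l1.take i).countP (fun c => !(c == '_'))
                + ((l1.drop i).take (eN - i)).countP (fun c => !(c == '_')) := by
            rw [htake, List.countP_append]
          have hall : (pyA_isEmptyWord ((l1.drop i).take (eN - i)) = false)
              ↔ 0 < List.countP (fun c => !(c == '_')) ((l1.drop i).take (eN - i)) := by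
            rw [List.countP_pos_iff]
            unfold pyA_isEmptyWord
            rw [Bool.eq_false_iff, ne_eq, List.all_eq_true]
            push_neg
            constructor
            · rintro ⟨c, hc, hcne⟩
              exact ⟨c, hc, by simpa using hcne⟩
            · rintro ⟨c, hc, hcne⟩
              exact ⟨c, hc, by simpa using hcne⟩
          simp only [Bool.not_eq_true', Bool.and_eq_true, decide_eq_true_eq, Int.toNat_natCast,
            Nat.cast_lt, hni, hne]
          rw [hall, hni, hne] at *
          constructor
          · intro hpos
            exact ⟨by exact_mod_cast hie, by omega⟩
          · rintro ⟨-, hlt⟩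
            omega
        · have : eN - i = 0 := by omega
          rw [this]
          simp only [List.take_zero, Bool.not_eq_true', Bool.and_eq_true, decide_eq_true_eq,
            Int.toNat_natCast, Nat.cast_lt]
          unfold pyA_isEmptyWord
          simp
          omega
      rw [h3]
      simp only [Bool.and_eq_true]
      tauto
    · have hd : decide (lenb ≤ altCP l0.reverse l1.reverse) = false := by simp [hcs]
      rw [hd]
      simp
  · -- lenb > R: the suffix of rhs is too short; both sides false
    have hcs : decide (lenb ≤ altCP l0.reverse l1.reverse) = false := by
      have hle := altCP_le_right l0.reverse l1.reverse
      rw [List.length_reverse, ← hR] at hle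
      simp only [decide_eq_false_iff_not]
      omega
    have h2 : (PySem.List.slice l1 (some ((R : Int) - ((lenb : Nat) : Int))) none
        == PySem.List.slice l0 (some ((i : Int) + 1)) none) = false := by
      rw [beq_eq_false_iff_ne]
      intro hEq
      have hlen : (PySem.List.slice l1 (some ((R : Int) - ((lenb : Nat) : Int))) none).length
          = (PySem.List.slice l0 (some ((i : Int) + 1)) none).length := by rw [hEq]
      rw [hb, List.length_drop, PySem.List.slice_some_none, List.length_drop] at hlen
      have hcl : PySem.List.clampIdx l1.length ((R : Int) - ((lenb : Nat) : Int)) ≤ l1.length := by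
        unfold PySem.List.clampIdx
        split
        · split <;> omega
        · exact min_le_right _ _
      rw [← hR] at hcl
      rw [← hR, ← hL] at hlen
      omega
    rw [h2, hcs]
    simp

-- ===== VERDICT (by name: the statement is the Claim_ definition above) =====
theorem is_type_1_kz_spec : Claim_equal_is_type_1_kz := by
  intro vt vn s p _
  unfold Spec_is_type_1_kz is_type_1_kz is_type_1_kz_alt
  simp only
  simp only [ruleOk_eq]
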